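-- pv_equiv track=rewrite | github.com/RakeshDesale/Python-Development | Logic-Based-Programming/LBP-230/solution4.py | sortColEleDesc
-- ===== SOURCE A (Python) =====
-- def sortColEleDesc(L):
--     LL = [[0,0,0],[0,0,0],[0,0,0]]
--     for i in range(3):
--         for j in range(3):
--             LL[i][j] = L[j][i]
--     for i in range(3):
--         for j in range(3):
--             for k in range(j + 1, 3):
--                 if LL[i][j] < LL[i][k]:
--                     LL[i][j], LL[i][k] = LL[i][k], LL[i][j]
--     return LL
-- ===== SOURCE B (Python) =====
-- def sortColEleDesc(L):
--     return [sorted([L[j][i] for j in range(3)], reverse=True) for i in range(3)]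
-- ===== Notes on version B (the rewrite author's own statement) =====
-- stated objective: simpler
-- what changed: Replaces the hand-written transpose into a preallocated 3x3 buffer plus a triple-nested compare-and-swap exchange sort with a single comprehension over the three column indices that gathers each column and sorts it with the library sorted(..., reverse=True).
import Mathlib
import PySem

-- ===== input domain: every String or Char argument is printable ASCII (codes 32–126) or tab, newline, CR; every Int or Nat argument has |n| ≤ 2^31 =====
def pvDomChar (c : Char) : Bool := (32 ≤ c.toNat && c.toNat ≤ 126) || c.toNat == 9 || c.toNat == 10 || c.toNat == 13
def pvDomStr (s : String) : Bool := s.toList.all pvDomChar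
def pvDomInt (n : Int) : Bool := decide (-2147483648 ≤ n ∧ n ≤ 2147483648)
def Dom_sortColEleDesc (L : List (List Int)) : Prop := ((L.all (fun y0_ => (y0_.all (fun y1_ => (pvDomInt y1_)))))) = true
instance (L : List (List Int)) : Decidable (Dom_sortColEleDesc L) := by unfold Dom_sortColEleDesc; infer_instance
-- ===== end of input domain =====

-- B replaces A's hand-written transpose + triple-loop exchange sort by a single comprehension
-- over the three column indices using the library sort (objective: simpler).

-- ===== PORT A =====
-- LL[i][j] read: Python raises IndexError out of range; Pre_ keeps all indices in range, so the 0 default is unreachable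
def pvGet2 (LL : List (List Int)) (i j : Int) : Int :=
  (PySem.List.pyGet? ((PySem.List.pyGet? LL i).getD []) j).getD 0
-- LL[i][j] = v: the indices produced by range(3) are nonnegative, so .toNat is exact here
def pvSet2 (LL : List (List Int)) (i j : Int) (v : Int) : List (List Int) :=
  LL.set i.toNat (((PySem.List.pyGet? LL i).getD []).set j.toNat v)
-- the body of the innermost loop: 'if LL[i][j] < LL[i][k]: LL[i][j], LL[i][k] = LL[i][k], LL[i][j]'
def pvSwapStep (LL : List (List Int)) (i j k : Int) : List (List Int) :=
  if pvGet2 LL i j < pvGet2 LL i k then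
    let a := pvGet2 LL i k
    let b := pvGet2 LL i j
    pvSet2 (pvSet2 LL i j a) i k b
  else LL
-- the i-th iteration of the sorting phase (the j/k loops)
def pvRowPass (LL : List (List Int)) (i : Int) : List (List Int) :=
  (PySem.List.pyRange 0 3 1).foldl (fun LL j =>
    (PySem.List.pyRange (j+1) 3 1).foldl (fun LL k => pvSwapStep LL i j k) LL) LL
-- the first double loop: LL[i][j] = L[j][i] over the initial [[0,0,0],[0,0,0],[0,0,0]]
def pvTranspose (L : List (List Int)) : List (List Int) :=
  (PySem.List.pyRange 0 3 1).foldl (fun LL i =>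
    (PySem.List.pyRange 0 3 1).foldl (fun LL j =>
      pvSet2 LL i j (pvGet2 L j i)) LL) [[0,0,0],[0,0,0],[0,0,0]]

def sortColEleDesc (L : List (List Int)) : List (List Int) :=
  (PySem.List.pyRange 0 3 1).foldl (fun LL i => pvRowPass LL i) (pvTranspose L)

-- ===== PORT B =====
def sortColEleDesc_alt (L : List (List Int)) : List (List Int) :=
  (PySem.List.pyRange 0 3 1).map (fun i =>
    PySem.List.sorted
      ((PySem.List.pyRange 0 3 1).map (fun j =>
        (PySem.List.pyGet? ((PySem.List.pyGet? L j).getD []) i).getD 0))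
      (fun v => v) true)

-- ===== PRECONDITION & SPEC =====
-- Pre_ excludes exactly the inputs where the Python A raises IndexError (B raises there too):
-- fewer than 3 rows, or one of the first 3 rows shorter than 3.
def Pre_sortColEleDesc (L : List (List Int)) : Prop :=
  3 ≤ L.length ∧ ∀ r ∈ L.take 3, 3 ≤ r.length
instance (L : List (List Int)) : Decidable (Pre_sortColEleDesc L) := by
  unfold Pre_sortColEleDesc; infer_instance
def pvWitness_sortColEleDesc : List (List Int) := [[1,2,3],[4,5,6],[7,8,9]]

def Spec_sortColEleDesc (L : List (List Int)) (out : List (List Int)) : Prop := out = sortColEleDesc_alt L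
instance (L : List (List Int)) (out : List (List Int)) : Decidable (Spec_sortColEleDesc L out) := by unfold Spec_sortColEleDesc; infer_instance

-- ===== CLAIM (what is proved, stated in full; the proofs are below) =====
def Claim_equal_sortColEleDesc : Prop := ∀ (L : List (List Int)), Dom_sortColEleDesc L → Pre_sortColEleDesc L → Spec_sortColEleDesc L (sortColEleDesc L)

-- ===== LEMMAS AND PROOFS =====

lemma pvRange03 : PySem.List.pyRange 0 3 1 = [0, 1, 2] := by decide
lemma pvRange13 : PySem.List.pyRange (0+1) 3 1 = [1, 2] := by decide
lemma pvRange23 : PySem.List.pyRange (1+1) 3 1 = [2] := by decide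
lemma pvRange33 : PySem.List.pyRange (2+1) 3 1 = [] := by decide

-- A's exchange pass on one row of three elements, as the same three compare-and-swap steps
def pvSort3 (a b c : Int) : List Int :=
  let p := if a < b then b else a
  let q := if a < b then a else b
  let p' := if p < c then c else p
  let c' := if p < c then p else c
  let q' := if q < c' then c' else q
  let c'' := if q < c' then q else c'
  [p', q', c'']

lemma pvSort3_eq_sorted (a b c : Int) :
    pvSort3 a b c = PySem.List.sorted [a, b, c] (fun v => v) true := by
  simp only [pvSort3]
  simp [PySem.List.sorted, PySem.List.insertBy]
  split_ifs <;> simp_all [PySem.List.insertBy] <;> (try split_ifs) <;> (try simp_all) <;> omega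

lemma pvSwap01_0 (x y z : Int) (r1 r2 : List Int) :
    pvSwapStep [[x,y,z], r1, r2] 0 0 1 = [[if x < y then y else x, if x < y then x else y, z], r1, r2] := by
  simp [pvSwapStep, pvGet2, pvSet2, PySem.List.pyGet?, PySem.List.pyIdx?]
  split_ifs <;> simp

lemma pvSwap02_0 (x y z : Int) (r1 r2 : List Int) :
    pvSwapStep [[x,y,z], r1, r2] 0 0 2 = [[if x < z then z else x, y, if x < z then x else z], r1, r2] := by
  simp [pvSwapStep, pvGet2, pvSet2, PySem.List.pyGet?, PySem.List.pyIdx?]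
  split_ifs <;> simp

lemma pvSwap12_0 (x y z : Int) (r1 r2 : List Int) :
    pvSwapStep [[x,y,z], r1, r2] 0 1 2 = [[x, if y < z then z else y, if y < z then y else z], r1, r2] := by
  simp [pvSwapStep, pvGet2, pvSet2, PySem.List.pyGet?, PySem.List.pyIdx?]
  split_ifs <;> simp

lemma pvSwap01_1 (x y z : Int) (r0 r2 : List Int) :
    pvSwapStep [r0, [x,y,z], r2] 1 0 1 = [r0, [if x < y then y else x, if x < y then x else y, z], r2] := by
  simp [pvSwapStep, pvGet2, pvSet2, PySem.List.pyGet?, PySem.List.pyIdx?]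
  split_ifs <;> simp

lemma pvSwap02_1 (x y z : Int) (r0 r2 : List Int) :
    pvSwapStep [r0, [x,y,z], r2] 1 0 2 = [r0, [if x < z then z else x, y, if x < z then x else z], r2] := by
  simp [pvSwapStep, pvGet2, pvSet2, PySem.List.pyGet?, PySem.List.pyIdx?]
  split_ifs <;> simp

lemma pvSwap12_1 (x y z : Int) (r0 r2 : List Int) :
    pvSwapStep [r0, [x,y,z], r2] 1 1 2 = [r0, [x, if y < z then z else y, if y < z then y else z], r2] := by
  simp [pvSwapStep, pvGet2, pvSet2, PySem.List.pyGet?, PySem.List.pyIdx?]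
  split_ifs <;> simp

lemma pvSwap01_2 (x y z : Int) (r0 r1 : List Int) :
    pvSwapStep [r0, r1, [x,y,z]] 2 0 1 = [r0, r1, [if x < y then y else x, if x < y then x else y, z]] := by
  simp [pvSwapStep, pvGet2, pvSet2, PySem.List.pyGet?, PySem.List.pyIdx?]
  split_ifs <;> simp

lemma pvSwap02_2 (x y z : Int) (r0 r1 : List Int) :
    pvSwapStep [r0, r1, [x,y,z]] 2 0 2 = [r0, r1, [if x < z then z else x, y, if x < z then x else z]] := by
  simp [pvSwapStep, pvGet2, pvSet2, PySem.List.pyGet?, PySem.List.pyIdx?]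
  split_ifs <;> simp

lemma pvSwap12_2 (x y z : Int) (r0 r1 : List Int) :
    pvSwapStep [r0, r1, [x,y,z]] 2 1 2 = [r0, r1, [x, if y < z then z else y, if y < z then y else z]] := by
  simp [pvSwapStep, pvGet2, pvSet2, PySem.List.pyGet?, PySem.List.pyIdx?]
  split_ifs <;> simp

lemma pvPass0 (a b c : Int) (r1 r2 : List Int) :
    pvRowPass [[a,b,c], r1, r2] 0 = [pvSort3 a b c, r1, r2] := by
  simp only [pvRowPass, pvRange03, pvRange13, pvRange23, pvRange33, List.foldl]
  rw [pvSwap01_0, pvSwap02_0, pvSwap12_0]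
  rfl

lemma pvPass1 (a b c : Int) (r0 r2 : List Int) :
    pvRowPass [r0, [a,b,c], r2] 1 = [r0, pvSort3 a b c, r2] := by
  simp only [pvRowPass, pvRange03, pvRange13, pvRange23, pvRange33, List.foldl]
  rw [pvSwap01_1, pvSwap02_1, pvSwap12_1]
  rfl

lemma pvPass2 (a b c : Int) (r0 r1 : List Int) :
    pvRowPass [r0, r1, [a,b,c]] 2 = [r0, r1, pvSort3 a b c] := by
  simp only [pvRowPass, pvRange03, pvRange13, pvRange23, pvRange33, List.foldl]
  rw [pvSwap01_2, pvSwap02_2, pvSwap12_2]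
  rfl

lemma pvTranspose_eval (x00 x01 x02 x10 x11 x12 x20 x21 x22 : Int)
    (t0 t1 t2 : List Int) (rest : List (List Int)) :
    pvTranspose ((x00::x01::x02::t0)::(x10::x11::x12::t1)::(x20::x21::x22::t2)::rest)
      = [[x00,x10,x20],[x01,x11,x21],[x02,x12,x22]] := by
  simp only [pvTranspose, pvRange03, List.foldl]
  norm_num [pvSet2, pvGet2, PySem.List.pyGet?_of_nonneg,
    show Int.toNat 0 = 0 from rfl, show Int.toNat 1 = 1 from rfl, show Int.toNat 2 = 2 from rfl]

-- ===== VERDICT (by name: the statement is the Claim_ definition above) =====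
theorem sortColEleDesc_spec : Claim_equal_sortColEleDesc := by
  intro L _ hpre
  obtain ⟨hlen, hrows⟩ := hpre
  match L, hlen with
  | (r0 :: r1 :: r2 :: _), _ =>
    have h0 : 3 ≤ r0.length := hrows r0 (by simp)
    have h1 : 3 ≤ r1.length := hrows r1 (by simp)
    have h2 : 3 ≤ r2.length := hrows r2 (by simp)
    match r0, h0 with
    | (x00 :: x01 :: x02 :: _), _ =>
    match r1, h1 with
    | (x10 :: x11 :: x12 :: _), _ =>
    match r2, h2 with
    | (x20 :: x21 :: x22 :: _), _ =>
      show sortColEleDesc _ = sortColEleDesc_alt _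
      simp only [sortColEleDesc, pvRange03, List.foldl, pvTranspose_eval]
      rw [pvPass0, pvPass1, pvPass2]
      simp only [sortColEleDesc_alt, pvRange03, List.map]
      norm_num [PySem.List.pyGet?_of_nonneg,
        show Int.toNat 0 = 0 from rfl, show Int.toNat 1 = 1 from rfl, show Int.toNat 2 = 2 from rfl]
      simp only [pvSort3_eq_sorted]
      exact ⟨trivial, trivial, trivial⟩
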